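-- pv_equiv track=rewrite | github.com/mrukriti-ai/college-design-programs-api | college_design_app.py | filter_colleges
-- ===== SOURCE A (Python) =====
-- from typing import List, Dict, Any
--
-- def filter_colleges(colleges: List[Dict[str, Any]], filters: Dict[str, Any]) -> List[Dict[str, Any]]:
--     """Filter colleges based on criteria"""
--     filtered_colleges = colleges.copy()
--
--     for key, value in filters.items():
--         if key == 'program_type' and value != "All":
--             filtered_colleges = [c for c in filtered_colleges if c.get('program_type', '').lower() == value.lower()]
--         elif key == 'location_country' and value != "Any":
--             # Handle location mapping
--             location_mapping = {
--                 "North America": "USA",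
--                 "Europe": "UK",
--                 "Asia": "China",
--                 "Australia": "Australia"
--             }
--             mapped_location = location_mapping.get(value, value)
--             filtered_colleges = [c for c in filtered_colleges if c.get('location_country', '').lower() == mapped_location.lower()]
--         elif key == 'degree_level' and value != "Any":
--             filtered_colleges = [c for c in filtered_colleges if c.get('degree_level', '').lower() == value.lower()]
--
--     return filtered_colleges
-- ===== SOURCE B (Python) =====
-- def filter_colleges(colleges, filters):
--     """Filter colleges based on criteria"""
--     location_mapping = {
--         "North America": "USA",
--         "Europe": "UK",
--         "Asia": "China",
--         "Australia": "Australia"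
--     }
--     criteria = []
--     for key, value in filters.items():
--         if key == 'program_type' and value != "All":
--             criteria.append(('program_type', value))
--         elif key == 'location_country' and value != "Any":
--             criteria.append(('location_country', location_mapping.get(value, value)))
--         elif key == 'degree_level' and value != "Any":
--             criteria.append(('degree_level', value))
--     return [c for c in colleges
--             if all(c.get(field, '').lower() == value.lower() for field, value in criteria)]
-- ===== Notes on version B (the rewrite author's own statement) =====
-- stated objective: alternative
-- what changed: B compiles the filters dict into a list of (field, expected-value) criteria once, then makes a single pass over colleges keeping those matching all criteria, instead of A's repeated whole-list comprehensions that rebuild the filtered list per filter key.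
import Mathlib
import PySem

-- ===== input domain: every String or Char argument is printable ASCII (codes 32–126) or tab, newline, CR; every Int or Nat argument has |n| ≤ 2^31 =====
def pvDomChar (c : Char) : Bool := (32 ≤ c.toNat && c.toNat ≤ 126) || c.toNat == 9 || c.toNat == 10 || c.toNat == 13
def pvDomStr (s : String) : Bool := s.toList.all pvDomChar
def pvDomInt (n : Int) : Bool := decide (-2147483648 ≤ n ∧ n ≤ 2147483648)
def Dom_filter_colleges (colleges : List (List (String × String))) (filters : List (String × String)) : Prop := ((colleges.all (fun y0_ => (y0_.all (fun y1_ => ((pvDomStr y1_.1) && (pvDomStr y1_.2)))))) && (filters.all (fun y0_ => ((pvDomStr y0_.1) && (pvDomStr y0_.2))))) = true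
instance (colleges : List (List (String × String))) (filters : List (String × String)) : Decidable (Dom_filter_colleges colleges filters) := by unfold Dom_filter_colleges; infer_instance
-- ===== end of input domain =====

-- B compiles the filters into one criteria list and filters colleges in a single pass;
-- A rebuilds the filtered list once per filter key. Same values, different decomposition.

-- ===== PORT A =====
-- c.get(field, '') on the association-list dict
def pvGetS (c : List (String × String)) (k : String) : String :=
  PySem.Dict.getD (PySem.Dict.mk c) k ""

def pvLocMap : List (String × String) :=
  [("North America", "USA"), ("Europe", "UK"), ("Asia", "China"), ("Australia", "Australia")]

-- one iteration of A's 'for key, value in filters.items()' loop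
def pvStepA (filtered : List (List (String × String))) (kv : String × String) : List (List (String × String)) :=
  if kv.1 == "program_type" && kv.2 != "All" then
    filtered.filter (fun c => PySem.Str.lower (pvGetS c "program_type") == PySem.Str.lower kv.2)
  else if kv.1 == "location_country" && kv.2 != "Any" then
    let mapped := PySem.Dict.getD (PySem.Dict.mk pvLocMap) kv.2 kv.2
    filtered.filter (fun c => PySem.Str.lower (pvGetS c "location_country") == PySem.Str.lower mapped)
  else if kv.1 == "degree_level" && kv.2 != "Any" then
    filtered.filter (fun c => PySem.Str.lower (pvGetS c "degree_level") == PySem.Str.lower kv.2)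
  else filtered

def filter_colleges (colleges : List (List (String × String))) (filters : List (String × String)) : List (List (String × String)) :=
  filters.foldl pvStepA colleges

-- ===== PORT B =====
-- one filter entry → the active criterion it contributes (none for sentinels / unrecognised keys)
def pvCritOf (kv : String × String) : Option (String × String) :=
  if kv.1 == "program_type" && kv.2 != "All" then some ("program_type", kv.2)
  else if kv.1 == "location_country" && kv.2 != "Any" then
    some ("location_country", PySem.Dict.getD (PySem.Dict.mk pvLocMap) kv.2 kv.2)
  else if kv.1 == "degree_level" && kv.2 != "Any" then some ("degree_level", kv.2)
  else none

def filter_colleges_alt (colleges : List (List (String × String))) (filters : List (String × String)) : List (List (String × String)) :=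
  let criteria := filters.filterMap pvCritOf
  colleges.filter (fun c =>
    criteria.all (fun fv => PySem.Str.lower (pvGetS c fv.1) == PySem.Str.lower fv.2))

-- ===== PRECONDITION & SPEC =====
def Spec_filter_colleges (colleges : List (List (String × String))) (filters : List (String × String)) (out : List (List (String × String))) : Prop := out = filter_colleges_alt colleges filters
instance (colleges : List (List (String × String))) (filters : List (String × String)) (out : List (List (String × String))) : Decidable (Spec_filter_colleges colleges filters out) := by unfold Spec_filter_colleges; infer_instance

-- ===== CLAIM (what is proved, stated in full; the proofs are below) =====
def Claim_equal_filter_colleges : Prop := ∀ (colleges : List (List (String × String))) (filters : List (String × String)), Dom_filter_colleges colleges filters → Spec_filter_colleges colleges filters (filter_colleges colleges filters)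

-- ===== LEMMAS AND PROOFS =====
-- A's loop step filters by exactly the criterion pvCritOf compiles from that filter entry.
theorem pvStepA_crit (filtered : List (List (String × String))) (kv : String × String) :
    pvStepA filtered kv =
      match pvCritOf kv with
      | none => filtered
      | some fv => filtered.filter (fun c => PySem.Str.lower (pvGetS c fv.1) == PySem.Str.lower fv.2) := by
  unfold pvStepA pvCritOf
  by_cases h1 : (kv.1 == "program_type" && kv.2 != "All") = true <;>
    by_cases h2 : (kv.1 == "location_country" && kv.2 != "Any") = true <;>
      by_cases h3 : (kv.1 == "degree_level" && kv.2 != "Any") = true <;>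
        simp [h1, h2, h3]

-- A's sequence of per-key filters equals B's single filter by the compiled criteria list.
theorem filter_colleges_eq_alt (filters : List (String × String)) (colleges : List (List (String × String))) :
    filter_colleges colleges filters = filter_colleges_alt colleges filters := by
  induction filters generalizing colleges with
  | nil => simp [filter_colleges, filter_colleges_alt]
  | cons kv rest ih =>
    simp only [filter_colleges] at ih ⊢
    rw [List.foldl_cons, pvStepA_crit]
    cases hc : pvCritOf kv with
    | none =>
      simp only [ih]
      simp [filter_colleges_alt, hc]
    | some fv =>
      simp only [ih]
      simp [filter_colleges_alt, hc, List.filter_filter, Bool.and_comm]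

-- ===== VERDICT (by name: the statement is the Claim_ definition above) =====
theorem filter_colleges_spec : Claim_equal_filter_colleges := by
  intro colleges filters _
  unfold Spec_filter_colleges
  exact filter_colleges_eq_alt filters colleges
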